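-- pv_equiv track=rewrite | github.com/z130110/project_ | bib/feature_creation/fc.py | cut_pages_for_sessions
-- ===== SOURCE A (Python) =====
-- def cut_pages_for_sessions(clicks):
--     out = []
--     for click in clicks:
--         if "danskebank.dk/privat/bliv-kunde" in click:
--             if out == []:
--                 return None
--             return out
--         else:
--             out.append(click)
--     return out
-- ===== SOURCE B (Python) =====
-- def cut_pages_for_sessions(clicks):
--     lst = list(clicks)
--     i = next((i for i, c in enumerate(lst)
--               if "danskebank.dk/privat/bliv-kunde" in c), None)
--     if i is None:
--         return lst
--     if i == 0:
--         return None
--     return lst[:i]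
-- ===== Notes on version B (the rewrite author's own statement) =====
-- stated objective: simpler
-- what changed: B first locates the index of the first click containing the marker (single search, no accumulator), then returns the whole list, None, or one slice, instead of A's element-by-element append loop with mid-loop returns.
import Mathlib
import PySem

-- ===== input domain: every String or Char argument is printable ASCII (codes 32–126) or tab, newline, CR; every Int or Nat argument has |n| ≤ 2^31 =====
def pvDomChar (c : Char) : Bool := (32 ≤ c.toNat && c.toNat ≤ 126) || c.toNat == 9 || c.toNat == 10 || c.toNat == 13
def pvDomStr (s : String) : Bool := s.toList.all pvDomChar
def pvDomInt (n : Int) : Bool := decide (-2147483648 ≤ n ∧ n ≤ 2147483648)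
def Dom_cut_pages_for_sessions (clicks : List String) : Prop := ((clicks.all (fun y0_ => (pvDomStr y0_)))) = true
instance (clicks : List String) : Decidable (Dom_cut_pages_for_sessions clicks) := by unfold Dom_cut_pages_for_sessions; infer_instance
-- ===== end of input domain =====

-- B replaces A's append-accumulator loop by an index search plus a single slice (same behaviour; simpler decomposition, not faster).
-- ===== PORT A =====
def pvMarker : String := "danskebank.dk/privat/bliv-kunde"

def cutA_go (out : List String) : List String → Option (List String)
  | [] => some out
  | click :: rest =>
    if PySem.Str.isIn pvMarker click then
      (if out = [] then none else some out)
    else cutA_go (out ++ [click]) rest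

def cut_pages_for_sessions (clicks : List String) : Option (List String) :=
  cutA_go [] clicks

-- ===== PORT B =====
-- B: find the first index whose element contains the marker, then return
-- the whole list / none / one slice.
def cut_pages_for_sessions_alt (clicks : List String) : Option (List String) :=
  match clicks.findIdx? (fun c => PySem.Str.isIn pvMarker c) with
  | none => some clicks
  | some 0 => none
  | some i => some (clicks.take i)

-- ===== PRECONDITION & SPEC =====
def Spec_cut_pages_for_sessions (clicks : List String) (out : Option (List String)) : Prop := out = cut_pages_for_sessions_alt clicks
instance (clicks : List String) (out : Option (List String)) : Decidable (Spec_cut_pages_for_sessions clicks out) := by unfold Spec_cut_pages_for_sessions; infer_instance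

-- ===== CLAIM (what is proved, stated in full; the proofs are below) =====
def Claim_equal_cut_pages_for_sessions : Prop := ∀ (clicks : List String), Dom_cut_pages_for_sessions clicks → Spec_cut_pages_for_sessions clicks (cut_pages_for_sessions clicks)

-- ===== LEMMAS AND PROOFS =====

-- ===== VERDICT (by name: the statement is the Claim_ definition above) =====
lemma cutA_go_eq (cs out : List String) :
    cutA_go out cs =
      match cs.findIdx? (fun c => PySem.Str.isIn pvMarker c) with
      | none => some (out ++ cs)
      | some i => if out ++ cs.take i = [] then none else some (out ++ cs.take i) := by
  induction cs generalizing out with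
  | nil => simp [cutA_go]
  | cons c rest ih =>
    by_cases h : PySem.Str.isIn pvMarker c
    · simp only [PySem.Str.isIn_eq] at h
      simp [cutA_go, h, List.findIdx?_cons, PySem.Str.isIn]
    · simp only [cutA_go, h, if_false, ih, List.findIdx?_cons, Bool.false_eq_true]
      cases hf : rest.findIdx? (fun c => PySem.Str.isIn pvMarker c) with
      | none => simp
      | some i => simp [List.take_succ_cons]

theorem cut_pages_for_sessions_spec : Claim_equal_cut_pages_for_sessions := by
  intro clicks _
  show cut_pages_for_sessions clicks = cut_pages_for_sessions_alt clicks
  unfold cut_pages_for_sessions cut_pages_for_sessions_alt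
  rw [cutA_go_eq]
  cases hf : clicks.findIdx? (fun c => PySem.Str.isIn pvMarker c) with
  | none => simp
  | some i =>
    cases i with
    | zero => simp
    | succ j =>
      have hlen : j + 1 ≤ clicks.length := by
        have := List.findIdx?_eq_some_iff_findIdx_eq.mp hf
        omega
      have : clicks.take (j + 1) ≠ [] := by
        have : (clicks.take (j + 1)).length = j + 1 := by
          simp [List.length_take, Nat.min_eq_left hlen]
        intro h; rw [h] at this; simp at this
      simp [this]
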